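-- pv_equiv track=rewrite | github.com/durgeshsingh90/test | collab.py | categorize_and_expand_items
-- ===== SOURCE A (Python) =====
-- def categorize_and_expand_items(distinct_list, search_items=None):
--     """Categorize 'RUSSIAN' and 'SYRIA' variations into single categories for blocking and expand them for search items if needed."""
--     categorized_list = []
--     expanded_items = []
--
--     for item in distinct_list:
--         if item.startswith("RUSSIAN"):
--             if "RUSSIAN" not in categorized_list:
--                 categorized_list.append("RUSSIAN")
--         elif item.startswith("SYRIA"):
--             if "SYRIA" not in categorized_list:
--                 categorized_list.append("SYRIA")
--         else:
--             categorized_list.append(item)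
--
--     if search_items:
--         for item in search_items:
--             if item in ["RUSSIAN", "SYRIA"]:
--                 expanded_items.extend([i for i in distinct_list if i.startswith(item)])
--             else:
--                 expanded_items.append(item)
--
--     return categorized_list, expanded_items
-- ===== SOURCE B (Python) =====
-- def categorize_and_expand_items(distinct_list, search_items=None):
--     """Map each item to its category, keep markers only at their first occurrence
--     (precomputed indices), and expand search items from prefix lists computed once."""
--     def category(item):
--         if item.startswith("RUSSIAN"):
--             return "RUSSIAN"
--         if item.startswith("SYRIA"):
--             return "SYRIA"
--         return item
--
--     cats = [category(i) for i in distinct_list]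
--     first_idx = {"RUSSIAN": cats.index("RUSSIAN") if "RUSSIAN" in cats else -1,
--                  "SYRIA": cats.index("SYRIA") if "SYRIA" in cats else -1}
--     categorized_list = [c for idx, c in enumerate(cats) if first_idx.get(c, idx) == idx]
--     russian = [i for i in distinct_list if i.startswith("RUSSIAN")]
--     syria = [i for i in distinct_list if i.startswith("SYRIA")]
--     expanded_items = []
--     if search_items:
--         expanded_items = [x for it in search_items
--                           for x in (russian if it == "RUSSIAN"
--                                     else syria if it == "SYRIA" else [it])]
--     return categorized_list, expanded_items
-- ===== Notes on version B (the rewrite author's own statement) =====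
-- stated objective: alternative
-- what changed: B is comprehension-shaped instead of A's accumulator loops: it maps items to categories, keeps the RUSSIAN/SYRIA markers only at their precomputed first-occurrence index, and precomputes the two expansion lists once so the per-search-item rescan of distinct_list disappears.
import Mathlib
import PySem

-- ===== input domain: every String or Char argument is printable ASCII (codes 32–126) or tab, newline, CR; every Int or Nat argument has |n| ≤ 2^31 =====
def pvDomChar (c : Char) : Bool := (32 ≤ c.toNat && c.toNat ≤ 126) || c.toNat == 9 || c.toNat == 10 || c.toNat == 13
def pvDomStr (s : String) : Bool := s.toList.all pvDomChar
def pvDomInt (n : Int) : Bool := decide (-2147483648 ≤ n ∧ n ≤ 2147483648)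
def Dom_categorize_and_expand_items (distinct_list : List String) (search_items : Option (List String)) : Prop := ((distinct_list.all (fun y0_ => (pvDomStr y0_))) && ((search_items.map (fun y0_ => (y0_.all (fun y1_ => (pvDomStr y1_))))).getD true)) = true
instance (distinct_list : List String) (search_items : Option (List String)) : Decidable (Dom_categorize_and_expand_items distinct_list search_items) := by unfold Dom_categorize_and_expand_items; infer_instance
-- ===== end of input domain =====

-- B is comprehension-shaped (map to categories + first-occurrence-index filter) and precomputes
-- the two expansion lists once, removing A's per-search-item rescan (objective: alternative).

-- ===== PORT A =====
-- A's first loop: categorize, deduplicating the RUSSIAN/SYRIA markers.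
def catStep (acc : List String) (item : String) : List String :=
  if PySem.Str.startswith item "RUSSIAN" then
    (if acc.contains "RUSSIAN" then acc else acc ++ ["RUSSIAN"])
  else if PySem.Str.startswith item "SYRIA" then
    (if acc.contains "SYRIA" then acc else acc ++ ["SYRIA"])
  else acc ++ [item]

def categorize_and_expand_items (distinct_list : List String) (search_items : Option (List String)) : List String × List String :=
  let categorized_list := distinct_list.foldl catStep []
  let expanded_items : List String :=
    match search_items with
    | none => []
    | some items =>
      if items = [] then []      -- Python: `if search_items:` (None and [] are falsy)
      else items.foldl (fun acc item =>
        if item = "RUSSIAN" ∨ item = "SYRIA" then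
          acc ++ distinct_list.filter (fun i => PySem.Str.startswith i item)
        else acc ++ [item]) []
  (categorized_list, expanded_items)

-- ===== PORT B =====
-- Source B's helper `category`.
def pvCategory (item : String) : String :=
  if PySem.Str.startswith item "RUSSIAN" then "RUSSIAN"
  else if PySem.Str.startswith item "SYRIA" then "SYRIA"
  else item

-- `cats.index(v) if v in cats else -1`: PySem.List.index? is none exactly when v ∉ cats,
-- so this matches the guarded Python expression step for step.
def pvFirstIdx (cats : List String) (v : String) : Int :=
  match PySem.List.index? cats v with
  | some k => (k : Int)
  | none => -1

def categorize_and_expand_items_alt (distinct_list : List String) (search_items : Option (List String)) : List String × List String :=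
  let cats := distinct_list.map pvCategory
  let first_idx := (PySem.Dict.empty.insert "RUSSIAN" (pvFirstIdx cats "RUSSIAN")).insert
    "SYRIA" (pvFirstIdx cats "SYRIA")
  -- `[c for idx, c in enumerate(cats) if first_idx.get(c, idx) == idx]`
  let categorized_list :=
    ((PySem.List.enumerate cats 0).filter (fun p =>
        PySem.Dict.getD first_idx p.2 p.1 == p.1)).map (·.2)
  let russian := distinct_list.filter (fun i => PySem.Str.startswith i "RUSSIAN")
  let syria := distinct_list.filter (fun i => PySem.Str.startswith i "SYRIA")
  let expanded_items : List String :=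
    match search_items with
    | none => []
    | some items =>
      if items = [] then []      -- `if search_items:`
      else items.flatMap (fun it =>
        if it = "RUSSIAN" then russian
        else if it = "SYRIA" then syria
        else [it])
  (categorized_list, expanded_items)

-- ===== PRECONDITION & SPEC =====
def Spec_categorize_and_expand_items (distinct_list : List String) (search_items : Option (List String)) (out : List String × List String) : Prop := out = categorize_and_expand_items_alt distinct_list search_items
instance (distinct_list : List String) (search_items : Option (List String)) (out : List String × List String) : Decidable (Spec_categorize_and_expand_items distinct_list search_items out) := by unfold Spec_categorize_and_expand_items; infer_instance

-- ===== CLAIM (what is proved, stated in full; the proofs are below) =====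
def Claim_equal_categorize_and_expand_items : Prop := ∀ (distinct_list : List String) (search_items : Option (List String)), Dom_categorize_and_expand_items distinct_list search_items → Spec_categorize_and_expand_items distinct_list search_items (categorize_and_expand_items distinct_list search_items)

-- ===== LEMMAS AND PROOFS =====

-- Common reference: markers deduplicated on first occurrence, driven by two "seen" flags.
def dedupMk : List String → Bool → Bool → List String
  | [], _, _ => []
  | c :: cs, sR, sS =>
    if c = "RUSSIAN" then (if sR then dedupMk cs true sS else c :: dedupMk cs true sS)
    else if c = "SYRIA" then (if sS then dedupMk cs sR true else c :: dedupMk cs sR true)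
    else c :: dedupMk cs sR sS

theorem ne_russian_of_not_startswith (x : String)
    (h : ¬ PySem.Chars.startswith x.toList ['R','U','S','S','I','A','N'] = true) : ¬ x = "RUSSIAN" := by
  intro hx; subst hx; exact h (by decide)

theorem ne_syria_of_not_startswith (x : String)
    (h : ¬ PySem.Chars.startswith x.toList ['S','Y','R','I','A'] = true) : ¬ x = "SYRIA" := by
  intro hx; subst hx; exact h (by decide)

-- A's categorizing fold computes dedupMk over the category images.
theorem foldA (dl : List String) : ∀ acc : List String,
    dl.foldl catStep acc
      = acc ++ dedupMk (dl.map pvCategory) (acc.contains "RUSSIAN") (acc.contains "SYRIA") := by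
  induction dl with
  | nil => intro acc; simp [dedupMk]
  | cons x xs ih =>
    intro acc
    rw [List.foldl_cons, List.map_cons]
    by_cases hr : PySem.Chars.startswith x.toList ['R','U','S','S','I','A','N'] = true
    · have hcat : pvCategory x = "RUSSIAN" := by simp [pvCategory, hr]
      have hstep : catStep acc x = if acc.contains "RUSSIAN" then acc else acc ++ ["RUSSIAN"] := by
        simp [catStep, hr]
      rw [hstep, hcat]
      by_cases hc : acc.contains "RUSSIAN" = true
      · have hc' : "RUSSIAN" ∈ acc := by simpa using hc
        rw [if_pos hc, ih acc]
        simp [dedupMk, hc']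
      · have hc' : "RUSSIAN" ∉ acc := by simpa using hc
        rw [if_neg hc, ih (acc ++ ["RUSSIAN"])]
        have eR : (acc ++ ["RUSSIAN"]).contains "RUSSIAN" = true := by simp
        have eS : (acc ++ ["RUSSIAN"]).contains "SYRIA" = acc.contains "SYRIA" := by simp
        rw [eR, eS]
        simp [dedupMk, hc']
    · by_cases hs : PySem.Chars.startswith x.toList ['S','Y','R','I','A'] = true
      · have hcat : pvCategory x = "SYRIA" := by simp [pvCategory, hr, hs]
        have hstep : catStep acc x = if acc.contains "SYRIA" then acc else acc ++ ["SYRIA"] := by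
          simp [catStep, hr, hs]
        rw [hstep, hcat]
        by_cases hc : acc.contains "SYRIA" = true
        · have hc' : "SYRIA" ∈ acc := by simpa using hc
          rw [if_pos hc, ih acc]
          simp [dedupMk, hc']
        · have hc' : "SYRIA" ∉ acc := by simpa using hc
          rw [if_neg hc, ih (acc ++ ["SYRIA"])]
          have eR : (acc ++ ["SYRIA"]).contains "RUSSIAN" = acc.contains "RUSSIAN" := by simp
          have eS : (acc ++ ["SYRIA"]).contains "SYRIA" = true := by simp
          rw [eR, eS]
          simp [dedupMk, hc']
      · have hxr := ne_russian_of_not_startswith x hr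
        have hxs := ne_syria_of_not_startswith x hs
        have hcat : pvCategory x = x := by simp [pvCategory, hr, hs]
        have hstep : catStep acc x = acc ++ [x] := by simp [catStep, hr, hs]
        rw [hstep, hcat, ih (acc ++ [x])]
        have eR : (acc ++ [x]).contains "RUSSIAN" = acc.contains "RUSSIAN" := by
          simp; intro h; exact absurd h.symm hxr
        have eS : (acc ++ [x]).contains "SYRIA" = acc.contains "SYRIA" := by
          simp; intro h; exact absurd h.symm hxs
        rw [eR, eS]
        simp [dedupMk, hxr, hxs]

-- First occurrence characterized: the head of the suffix is the first occurrence iff absent from the prefix.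
theorem index_head_iff (c : String) (pre cs : List String) :
    PySem.List.index? (pre ++ c :: cs) c = some pre.length ↔ c ∉ pre := by
  constructor
  · intro h hmem
    rw [PySem.List.index?_eq_some_iff] at h
    obtain ⟨p', s', heq, hlen, hnot⟩ := h
    obtain ⟨hp, -⟩ := List.append_inj heq.symm (by omega)
    exact hnot (hp ▸ hmem)
  · intro h
    rw [PySem.List.index?_eq_some_iff]
    exact ⟨pre, cs, rfl, rfl, h⟩

-- B's enumerate/first-index filter also computes dedupMk, with the flags tracking the prefix.
theorem enumB (cats : List String) : ∀ (cs pre : List String), cats = pre ++ cs →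
    (((PySem.List.enumerate cs (pre.length : Int)).filter (fun p =>
        PySem.Dict.getD ((PySem.Dict.empty.insert "RUSSIAN" (pvFirstIdx cats "RUSSIAN")).insert
          "SYRIA" (pvFirstIdx cats "SYRIA")) p.2 p.1 == p.1)).map (·.2))
      = dedupMk cs (pre.contains "RUSSIAN") (pre.contains "SYRIA") := by
  intro cs
  induction cs with
  | nil => intro pre h; simp [PySem.List.enumerate, dedupMk]
  | cons c cs ih =>
    intro pre h
    have hrec := ih (pre ++ [c]) (by simp [h])
    have hlen : ((pre ++ [c]).length : Int) = (pre.length : Int) + 1 := by simp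
    rw [hlen] at hrec
    rw [PySem.List.enumerate_cons]
    by_cases hcr : c = "RUSSIAN"
    · subst hcr
      have eR : (pre ++ ["RUSSIAN"]).contains "RUSSIAN" = true := by simp
      have eS : (pre ++ ["RUSSIAN"]).contains "SYRIA" = pre.contains "SYRIA" := by simp
      rw [eR, eS] at hrec
      have hmem : "RUSSIAN" ∈ cats := by rw [h]; exact List.mem_append_right _ (List.mem_cons_self)
      obtain ⟨k, hk⟩ : ∃ k, PySem.List.index? cats "RUSSIAN" = some k := by
        cases hidx : PySem.List.index? cats "RUSSIAN" with
        | none => exact absurd hmem ((PySem.List.index?_eq_none_iff cats "RUSSIAN").mp hidx)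
        | some k => exact ⟨k, rfl⟩
      have hgd : PySem.Dict.getD ((PySem.Dict.empty.insert "RUSSIAN" (pvFirstIdx cats "RUSSIAN")).insert
          "SYRIA" (pvFirstIdx cats "SYRIA")) "RUSSIAN" (pre.length : Int) = (k : Int) := by
        simp only [PySem.Dict.getD_insert, if_neg (by decide : ¬ ("RUSSIAN":String) = "SYRIA")]
        unfold pvFirstIdx; rw [hk]; simp
      by_cases hcR : pre.contains "RUSSIAN" = true
      · have hcR' : "RUSSIAN" ∈ pre := by simpa using hcR
        have hkne : k ≠ pre.length := by
          intro hkk; subst hkk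
          exact (index_head_iff "RUSSIAN" pre cs).mp (h ▸ hk) hcR'
        rw [List.filter_cons, if_neg (by simp [hgd]; exact_mod_cast hkne), hrec]
        simp [dedupMk, hcR']
      · have hcR' : "RUSSIAN" ∉ pre := by simpa using hcR
        have hkeq : k = pre.length := by
          have := (index_head_iff "RUSSIAN" pre cs).mpr hcR'
          rw [← h] at this; rw [hk] at this; exact (Option.some.injEq _ _ ▸ this : _ )
        rw [List.filter_cons, if_pos (by simp [hgd, hkeq]), List.map_cons, hrec]
        simp [dedupMk, hcR']
    · by_cases hcs : c = "SYRIA"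
      · subst hcs
        have eR : (pre ++ ["SYRIA"]).contains "RUSSIAN" = pre.contains "RUSSIAN" := by simp
        have eS : (pre ++ ["SYRIA"]).contains "SYRIA" = true := by simp
        rw [eR, eS] at hrec
        have hmem : "SYRIA" ∈ cats := by rw [h]; exact List.mem_append_right _ (List.mem_cons_self)
        obtain ⟨k, hk⟩ : ∃ k, PySem.List.index? cats "SYRIA" = some k := by
          cases hidx : PySem.List.index? cats "SYRIA" with
          | none => exact absurd hmem ((PySem.List.index?_eq_none_iff cats "SYRIA").mp hidx)
          | some k => exact ⟨k, rfl⟩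
        have hgd : PySem.Dict.getD ((PySem.Dict.empty.insert "RUSSIAN" (pvFirstIdx cats "RUSSIAN")).insert
            "SYRIA" (pvFirstIdx cats "SYRIA")) "SYRIA" (pre.length : Int) = (k : Int) := by
          simp only [PySem.Dict.getD_insert]
          unfold pvFirstIdx; rw [hk]; simp
        by_cases hcS : pre.contains "SYRIA" = true
        · have hcS' : "SYRIA" ∈ pre := by simpa using hcS
          have hkne : k ≠ pre.length := by
            intro hkk; subst hkk
            exact (index_head_iff "SYRIA" pre cs).mp (h ▸ hk) hcS'
          rw [List.filter_cons, if_neg (by simp [hgd]; exact_mod_cast hkne), hrec]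
          simp [dedupMk, hcS']
        · have hcS' : "SYRIA" ∉ pre := by simpa using hcS
          have hkeq : k = pre.length := by
            have := (index_head_iff "SYRIA" pre cs).mpr hcS'
            rw [← h] at this; rw [hk] at this; exact (Option.some.injEq _ _ ▸ this : _ )
          rw [List.filter_cons, if_pos (by simp [hgd, hkeq]), List.map_cons, hrec]
          simp [dedupMk, hcS']
      · have eR : (pre ++ [c]).contains "RUSSIAN" = pre.contains "RUSSIAN" := by
          simp; intro h'; exact absurd h'.symm hcr
        have eS : (pre ++ [c]).contains "SYRIA" = pre.contains "SYRIA" := by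
          simp; intro h'; exact absurd h'.symm hcs
        rw [eR, eS] at hrec
        have hgd : PySem.Dict.getD ((PySem.Dict.empty.insert "RUSSIAN" (pvFirstIdx cats "RUSSIAN")).insert
            "SYRIA" (pvFirstIdx cats "SYRIA")) c (pre.length : Int) = (pre.length : Int) := by
          simp [PySem.Dict.getD_insert, hcr, hcs, PySem.Dict.getD_empty]
        rw [List.filter_cons, if_pos (by simp [hgd]), List.map_cons, hrec]
        simp [dedupMk, hcr, hcs]

-- A's expansion fold equals B's flatMap over the precomputed lists.
theorem expandAB (dl items : List String) :
    items.foldl (fun acc item =>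
        if item = "RUSSIAN" ∨ item = "SYRIA" then
          acc ++ dl.filter (fun i => PySem.Str.startswith i item)
        else acc ++ [item]) []
      = items.flatMap (fun it =>
        if it = "RUSSIAN" then dl.filter (fun i => PySem.Str.startswith i "RUSSIAN")
        else if it = "SYRIA" then dl.filter (fun i => PySem.Str.startswith i "SYRIA")
        else [it]) := by
  have h := PySem.List.foldl_append_eq_flatMap
    (g := fun item => if item = "RUSSIAN" ∨ item = "SYRIA" then
        dl.filter (fun i => PySem.Str.startswith i item) else [item])
    (l := items) (acc := [])
  rw [show (fun (acc : List String) item =>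
        if item = "RUSSIAN" ∨ item = "SYRIA" then
          acc ++ dl.filter (fun i => PySem.Str.startswith i item)
        else acc ++ [item])
      = (fun acc item => acc ++ (if item = "RUSSIAN" ∨ item = "SYRIA" then
          dl.filter (fun i => PySem.Str.startswith i item) else [item])) from by
    funext acc item; by_cases h1 : item = "RUSSIAN" ∨ item = "SYRIA" <;> simp [h1]]
  rw [h, List.nil_append]
  apply List.flatMap_congr
  intro it _
  by_cases h1 : it = "RUSSIAN"
  · subst h1; simp
  · by_cases h2 : it = "SYRIA"
    · subst h2; simp
    · simp [h1, h2]

-- ===== VERDICT (by name: the statement is the Claim_ definition above) =====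
theorem categorize_and_expand_items_spec : Claim_equal_categorize_and_expand_items := by
  intro dl si _
  show _ = _
  unfold categorize_and_expand_items categorize_and_expand_items_alt
  simp only [Prod.mk.injEq]
  constructor
  · have h := enumB (dl.map pvCategory) (dl.map pvCategory) [] rfl
    simp only [List.length_nil, Nat.cast_zero] at h
    rw [foldA dl [], h]
    simp
  · cases si with
    | none => rfl
    | some items =>
      by_cases hnil : items = []
      · simp [hnil]
      · simp only [hnil, if_false]
        exact expandAB dl items
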